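-- pv_equiv track=rewrite | github.com/szabadkai/google-python-class | basic/string2.py | not_bad
-- ===== SOURCE A (Python) =====
-- def not_bad(s):
--     # +++your code here+++
--     a = s
--     for index in range(0, len(s)):
--         for x in range(0,len(s)-index):
--        # print (s[index])
--             if s[index:index+3] == 'not' and s[index + x:index+ x +3] == 'bad' and s[-1] != 'd' :
--                 a = s[0:index] + 'good' + s[-1]
--             elif s[index:index+3] == 'not' and s[index + x:index+ x +3] == 'bad' :
--                  a = s[0:index] + 'good'
--
--     return a
-- ===== SOURCE B (Python) =====
-- def not_bad(s):
--     # single backward pass: the seen_bad flag says a 'bad' starts at or after i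
--     seen_bad = False
--     for i in range(len(s) - 1, -1, -1):
--         if s.startswith('bad', i):
--             seen_bad = True
--         if seen_bad and s.startswith('not', i):
--             return s[:i] + 'good' + ('' if s[-1] == 'd' else s[-1])
--     return s
-- ===== Notes on version B (the rewrite author's own statement) =====
-- stated objective: faster
-- what changed: Replaced the nested index/offset scan (last matching pair wins) by a single backward pass that keeps a seen-bad flag and stops at the first (= highest) index where the not-marker starts with a bad-marker starting at or after it.
import Mathlib
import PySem

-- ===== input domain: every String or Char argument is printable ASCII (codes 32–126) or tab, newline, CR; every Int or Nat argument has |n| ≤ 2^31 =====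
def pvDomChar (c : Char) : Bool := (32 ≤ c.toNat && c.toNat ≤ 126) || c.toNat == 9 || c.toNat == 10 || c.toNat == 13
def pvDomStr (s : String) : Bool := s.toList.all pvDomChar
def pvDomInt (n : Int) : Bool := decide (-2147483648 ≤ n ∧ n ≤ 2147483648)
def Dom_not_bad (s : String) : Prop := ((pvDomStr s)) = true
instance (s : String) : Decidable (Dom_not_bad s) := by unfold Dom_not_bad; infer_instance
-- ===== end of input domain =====

-- B replaces A's nested last-match-wins scan by one backward pass with a seen-bad flag (measured faster, O(n) vs O(n^2)).


-- ===== PORT A =====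
-- inner 'for x in range(0, len(s)-index)' loop of A (the three string literals are ported as char lists)
def notBadStep (cs : List Char) (a : List Char) (index : Int) : List Char :=
  (PySem.List.pyRange 0 ((cs.length : Int) - index) 1).foldl (fun a x =>
    if PySem.List.slice cs (some index) (some (index + 3)) = ['n','o','t'] ∧
       PySem.List.slice cs (some (index + x)) (some (index + x + 3)) = ['b','a','d'] ∧
       PySem.List.pyGet? cs (-1) ≠ some 'd' then
      -- s[0:index] + 'good' + s[-1]  (s[-1] nonempty whenever this branch is reached)
      PySem.List.slice cs (some 0) (some index) ++ ['g','o','o','d'] ++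
        (PySem.List.pyGet? cs (-1)).elim [] (fun c => [c])
    else if PySem.List.slice cs (some index) (some (index + 3)) = ['n','o','t'] ∧
            PySem.List.slice cs (some (index + x)) (some (index + x + 3)) = ['b','a','d'] then
      PySem.List.slice cs (some 0) (some index) ++ ['g','o','o','d']
    else a) a

def not_bad (s : String) : String :=
  let cs := s.toList
  let a := cs
  String.ofList ((PySem.List.pyRange 0 (cs.length : Int) 1).foldl (notBadStep cs) a)

-- ===== PORT B =====
-- backward 'for i in range(len(s)-1, -1, -1)' loop of Source B with early return; the Nat argument
-- is i+1 (0 = loop done); s.startswith(p, i) is ported as startswith on cs.drop i (i ≥ 0 here).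
def notBadScan (cs : List Char) : Nat → Bool → List Char
  | 0, _ => cs
  | k + 1, seen =>
    let seen' := seen || PySem.Chars.startswith (cs.drop k) ['b','a','d']
    if seen' && PySem.Chars.startswith (cs.drop k) ['n','o','t'] then
      -- s[:i] + 'good' + ('' if s[-1] == 'd' else s[-1])
      cs.take k ++ ['g','o','o','d'] ++
        (match PySem.List.pyGet? cs (-1) with
         | some c => if c = 'd' then [] else [c]
         | none => [])
    else notBadScan cs k seen'

def not_bad_alt (s : String) : String :=
  let cs := s.toList
  String.ofList (notBadScan cs cs.length false)

-- ===== PRECONDITION & SPEC =====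
def Spec_not_bad (s : String) (out : String) : Prop := out = not_bad_alt s
instance (s : String) (out : String) : Decidable (Spec_not_bad s out) := by unfold Spec_not_bad; infer_instance

-- ===== CLAIM (what is proved, stated in full; the proofs are below) =====
def Claim_equal_not_bad : Prop := ∀ (s : String), Dom_not_bad s → Spec_not_bad s (not_bad s)

-- ===== LEMMAS AND PROOFS =====

-- tail appended by both programs: the last char unless it is the letter d (empty string gives [])
def tailApp (cs : List Char) : List Char :=
  match PySem.List.pyGet? cs (-1) with
  | some c => if c = 'd' then [] else [c]
  | none => []

-- the value both programs produce once the winning index m is known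
def vA (cs : List Char) (m : Nat) : List Char := cs.take m ++ ['g','o','o','d'] ++ tailApp cs

-- "index m qualifies": the not-marker starts at m and some bad-marker starts at j ≥ m
def ppB (cs : List Char) (m : Nat) : Bool :=
  ((cs.drop m).take 3 == ['n','o','t']) &&
  (List.range cs.length).any (fun j => decide (m ≤ j) && ((cs.drop j).take 3 == ['b','a','d']))

-- shared spec spine: the result after considering indices < m (last qualifying index wins)
def bestRes (cs : List Char) : Nat → List Char
  | 0 => cs
  | m + 1 => if ppB cs m then vA cs m else bestRes cs m

lemma take3_len {cs : List Char} {j : Nat} {p : List Char} (hp : p.length = 3)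
    (h : (cs.drop j).take 3 = p) : j + 3 ≤ cs.length := by
  have := congrArg List.length h
  simp [hp] at this
  omega

lemma ppB_iff (cs : List Char) (m : Nat) :
    ppB cs m = true ↔
      ((cs.drop m).take 3 = ['n','o','t'] ∧ ∃ j : Nat, m ≤ j ∧ (cs.drop j).take 3 = ['b','a','d']) := by
  simp only [ppB, Bool.and_eq_true, beq_iff_eq, List.any_eq_true, List.mem_range,
    decide_eq_true_eq]
  constructor
  · rintro ⟨h1, j, _, h2, h3⟩; exact ⟨h1, j, h2, h3⟩
  · rintro ⟨h1, j, h2, h3⟩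
    exact ⟨h1, j, by have := take3_len rfl h3; omega, h2, h3⟩

lemma foldl_if_const {α β : Type} (l : List β) (p : β → Prop) [DecidablePred p] (c a : α) :
    l.foldl (fun acc x => if p x then c else acc) a = if ∃ x ∈ l, p x then c else a := by
  induction l generalizing a with
  | nil => simp
  | cons h t ih => by_cases hp : p h <;> simp [hp, ih]

lemma slice_add3 (cs : List Char) (m : Nat) :
    PySem.List.slice cs (some (m : Int)) (some ((m : Int) + 3)) = (cs.drop m).take 3 := by
  have h3 : ((m : Int)) + 3 = ((m + 3 : Nat) : Int) := by push_cast; ring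
  rw [h3, PySem.List.slice_natCast]
  congr 1
  omega

lemma exists_bad_iff (cs : List Char) (m : Nat) :
    (∃ x ∈ PySem.List.pyRange 0 ((cs.length : Int) - (m : Int)) 1,
       PySem.List.slice cs (some ((m : Int) + x)) (some ((m : Int) + x + 3)) = ['b','a','d'])
    ↔ (∃ j : Nat, m ≤ j ∧ (cs.drop j).take 3 = ['b','a','d']) := by
  constructor
  · rintro ⟨x, hx, hb⟩
    rw [PySem.List.mem_pyRange_one] at hx
    obtain ⟨hx0, _⟩ := hx
    refine ⟨m + x.toNat, by omega, ?_⟩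
    have hmx : (m : Int) + x = ((m + x.toNat : Nat) : Int) := by push_cast; omega
    rw [hmx, slice_add3] at hb
    exact hb
  · rintro ⟨j, hj, hb⟩
    have hlen := take3_len rfl hb
    refine ⟨(j : Int) - (m : Int), ?_, ?_⟩
    · rw [PySem.List.mem_pyRange_one]
      constructor <;> omega
    · have hmx : (m : Int) + ((j : Int) - (m : Int)) = (j : Int) := by ring
      rw [hmx, slice_add3]
      exact hb

lemma notBadStep_eq (cs : List Char) (a : List Char) (m : Nat) :
    notBadStep cs a ((m : Nat) : Int) = if ppB cs m then vA cs m else a := by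
  unfold notBadStep
  have hzero : PySem.List.slice cs (some 0) (some ((m : Nat) : Int)) = cs.take m := by
    rw [PySem.List.slice_zero_start, PySem.List.slice_to_natCast]
  have hfun : (fun (a : List Char) (x : Int) =>
      if PySem.List.slice cs (some ((m : Nat) : Int)) (some (((m : Nat) : Int) + 3)) = ['n','o','t'] ∧
         PySem.List.slice cs (some (((m : Nat) : Int) + x)) (some (((m : Nat) : Int) + x + 3)) = ['b','a','d'] ∧
         PySem.List.pyGet? cs (-1) ≠ some 'd' then
        PySem.List.slice cs (some 0) (some ((m : Nat) : Int)) ++ ['g','o','o','d'] ++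
          (PySem.List.pyGet? cs (-1)).elim [] (fun c => [c])
      else if PySem.List.slice cs (some ((m : Nat) : Int)) (some (((m : Nat) : Int) + 3)) = ['n','o','t'] ∧
              PySem.List.slice cs (some (((m : Nat) : Int) + x)) (some (((m : Nat) : Int) + x + 3)) = ['b','a','d'] then
        PySem.List.slice cs (some 0) (some ((m : Nat) : Int)) ++ ['g','o','o','d']
      else a)
      = (fun (a : List Char) (x : Int) =>
      if PySem.List.slice cs (some ((m : Nat) : Int)) (some (((m : Nat) : Int) + 3)) = ['n','o','t'] ∧
         PySem.List.slice cs (some (((m : Nat) : Int) + x)) (some (((m : Nat) : Int) + x + 3)) = ['b','a','d'] then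
        vA cs m else a) := by
    funext a x
    rcases hg : PySem.List.pyGet? cs (-1) with _ | c
    · simp only [hg, hzero, vA, tailApp, Option.elim]
      split_ifs <;> simp_all
    · by_cases hd : c = 'd' <;>
        · simp only [hg, hd, hzero, vA, tailApp, Option.elim]
          split_ifs <;> simp_all
  rw [hfun, foldl_if_const]
  have hiff : (∃ x ∈ PySem.List.pyRange 0 ((cs.length : Int) - ((m : Nat) : Int)) 1,
      PySem.List.slice cs (some ((m : Nat) : Int)) (some (((m : Nat) : Int) + 3)) = ['n','o','t'] ∧
      PySem.List.slice cs (some (((m : Nat) : Int) + x)) (some (((m : Nat) : Int) + x + 3)) = ['b','a','d'])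
      ↔ ppB cs m = true := by
    rw [ppB_iff, slice_add3 cs m]
    constructor
    · rintro ⟨x, hx, h1, h2⟩
      exact ⟨h1, (exists_bad_iff cs m).1 ⟨x, hx, h2⟩⟩
    · rintro ⟨h1, h2⟩
      obtain ⟨x, hx, hb⟩ := (exists_bad_iff cs m).2 h2
      exact ⟨x, hx, h1, hb⟩
  rw [if_congr hiff rfl rfl]

lemma aFold_eq (cs : List Char) (m : Nat) :
    (PySem.List.pyRange 0 ((m : Nat) : Int) 1).foldl (notBadStep cs) cs = bestRes cs m := by
  induction m with
  | zero => simp [PySem.List.pyRange_one_eq_nil, bestRes]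
  | succ k ih =>
    have hc : (((k + 1 : Nat)) : Int) = ((k : Nat) : Int) + 1 := by push_cast; ring
    rw [hc, PySem.List.pyRange_one_succ_right (by exact_mod_cast Int.natCast_nonneg k),
      List.foldl_append]
    simp only [List.foldl_cons, List.foldl_nil]
    rw [ih, notBadStep_eq]
    simp [bestRes]

lemma startswith_take3 (cs : List Char) (k : Nat) (p : List Char) (hp : p.length = 3) :
    PySem.Chars.startswith (cs.drop k) p = true ↔ (cs.drop k).take 3 = p := by
  rw [PySem.Chars.startswith_iff, List.prefix_iff_eq_take, hp]
  exact eq_comm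

lemma scan_eq (cs : List Char) : ∀ (k : Nat) (seen : Bool),
    (seen = true ↔ ∃ j : Nat, k ≤ j ∧ (cs.drop j).take 3 = ['b','a','d']) →
    notBadScan cs k seen = bestRes cs k := by
  intro k
  induction k with
  | zero => intro seen _; rfl
  | succ k ih =>
    intro seen hseen
    have hinv : (seen || PySem.Chars.startswith (cs.drop k) ['b','a','d']) = true ↔
        ∃ j : Nat, k ≤ j ∧ (cs.drop j).take 3 = ['b','a','d'] := by
      rw [Bool.or_eq_true, hseen, startswith_take3 cs k _ rfl]
      constructor
      · rintro (⟨j, hj, hb⟩ | hb)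
        · exact ⟨j, by omega, hb⟩
        · exact ⟨k, le_refl k, hb⟩
      · rintro ⟨j, hj, hb⟩
        rcases Nat.eq_or_lt_of_le hj with h | h
        · exact Or.inr (h ▸ hb)
        · exact Or.inl ⟨j, by omega, hb⟩
    rw [notBadScan]
    by_cases hc : ((seen || PySem.Chars.startswith (cs.drop k) ['b','a','d']) &&
        PySem.Chars.startswith (cs.drop k) ['n','o','t']) = true
    · rw [if_pos hc]
      rw [Bool.and_eq_true] at hc
      have hpp : ppB cs k = true := by
        rw [ppB_iff]
        exact ⟨(startswith_take3 cs k _ rfl).1 hc.2, hinv.1 hc.1⟩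
      simp [bestRes, hpp, vA, tailApp]
    · rw [if_neg hc]
      have hpp : ¬ ppB cs k = true := by
        rw [ppB_iff]
        rintro ⟨h1, h2⟩
        exact hc (by rw [Bool.and_eq_true, hinv, startswith_take3 cs k _ rfl]; exact ⟨h2, h1⟩)
      have hb : bestRes cs (k + 1) = bestRes cs k := by simp [bestRes, hpp]
      rw [hb]
      exact ih _ hinv

-- ===== VERDICT (by name: the statement is the Claim_ definition above) =====
theorem not_bad_spec : Claim_equal_not_bad := by
  intro s _
  have hfalse : ((false = true) ↔
      ∃ j : Nat, s.toList.length ≤ j ∧ (s.toList.drop j).take 3 = ['b','a','d']) := by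
    constructor
    · intro h; simp at h
    · rintro ⟨j, hj, hb⟩
      have := take3_len rfl hb
      omega
  show not_bad s = not_bad_alt s
  show String.ofList
      (List.foldl (notBadStep s.toList) s.toList
        (PySem.List.pyRange 0 (s.toList.length : Int) 1)) =
    String.ofList (notBadScan s.toList s.toList.length false)
  rw [aFold_eq, scan_eq s.toList s.toList.length false hfalse]
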